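-- pv_equiv track=rewrite | github.com/usersaynoso/ha-cudy-router | custom_components/cudy_router/router_data.py | _wisp_data_score
-- ===== SOURCE A (Python) =====
-- from typing import TYPE_CHECKING, Any
--
-- def _entry_value(parsed: dict[str, Any], key: str) -> Any:
--     """Return the nested value for a parsed coordinator entry."""
--     entry = parsed.get(key, {})
--     if isinstance(entry, dict):
--         return entry.get("value")
--     return None
--
-- def _wisp_data_score(module_data: dict[str, Any]) -> tuple[int, int]:
--     """Score parsed WISP data so richer endpoint responses are preferred."""
--     rich_fields = sum(
--         _entry_value(module_data, key) not in (None, "")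
--         for key in (
--             "status",
--             "ssid",
--             "bssid",
--             "signal",
--             "quality",
--             "channel",
--             "channel_width",
--             "protocol",
--             "transmit_power",
--         )
--     )
--     populated_fields = sum(
--         entry.get("value") not in (None, "")
--         for entry in module_data.values()
--         if isinstance(entry, dict)
--     )
--     return rich_fields, populated_fields
-- ===== SOURCE B (Python) =====
-- _RICH_KEYS = frozenset((
--     "status", "ssid", "bssid", "signal", "quality", "channel",
--     "channel_width", "protocol", "transmit_power",
-- ))
--
-- def _wisp_data_score(module_data):
--     """Score parsed WISP data: one pass over the items, counting both totals."""
--     rich_fields = 0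
--     populated_fields = 0
--     for key, entry in module_data.items():
--         if isinstance(entry, dict):
--             val = entry.get("value")
--             if val not in (None, ""):
--                 populated_fields += 1
--                 if key in _RICH_KEYS:
--                     rich_fields += 1
--     return rich_fields, populated_fields
-- ===== Notes on version B (the rewrite author's own statement) =====
-- stated objective: simpler
-- what changed: B fuses A's two separate summations (one over 9 fixed keys with per-key dict lookups, one over all values) into a single pass over module_data.items() with two counters and a frozenset membership test; Pre_ excludes association lists with duplicate keys (top level or inside an entry), which do not uniquely represent a Python dict (Python keeps the last value, the list reading the first).
import Mathlib
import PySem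

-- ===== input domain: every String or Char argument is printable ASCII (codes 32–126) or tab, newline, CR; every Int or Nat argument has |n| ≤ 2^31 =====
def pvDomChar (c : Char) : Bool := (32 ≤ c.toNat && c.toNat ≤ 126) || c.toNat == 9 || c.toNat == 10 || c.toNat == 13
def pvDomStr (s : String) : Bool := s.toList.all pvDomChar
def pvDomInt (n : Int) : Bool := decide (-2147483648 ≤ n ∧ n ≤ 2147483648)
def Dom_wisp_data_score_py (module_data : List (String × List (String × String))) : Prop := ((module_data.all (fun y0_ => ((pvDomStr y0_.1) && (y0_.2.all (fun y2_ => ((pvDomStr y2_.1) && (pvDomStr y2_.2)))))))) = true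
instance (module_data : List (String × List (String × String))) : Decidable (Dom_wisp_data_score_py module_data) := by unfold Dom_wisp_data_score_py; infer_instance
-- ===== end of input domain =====

-- B fuses A's two summations into a single pass over the items with two counters (objective: simpler, one traversal).

-- ===== PORT A =====
-- `parsed.get(key, {})` on the association list: first match, default {}; the entry is a
-- dict by the declared type, so `isinstance(entry, dict)` is always true and the helper
-- returns `entry.get("value")`.
def pvEntryValue (parsed : List (String × List (String × String))) (key : String) : Option String :=
  let entry := (((parsed.find? (fun p => p.1 == key)).map (·.2)).getD [])
  (entry.find? (fun q => q.1 == "value")).map (·.2)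

def pvRichKeys : List String :=
  ["status", "ssid", "bssid", "signal", "quality", "channel",
   "channel_width", "protocol", "transmit_power"]

def wisp_data_score_py (module_data : List (String × List (String × String))) : Int × Int :=
  let rich_fields : Int :=
    (pvRichKeys.map (fun key =>
      if pvEntryValue module_data key = none ∨ pvEntryValue module_data key = some "" then (0 : Int) else 1)).sum
  let populated_fields : Int :=
    (module_data.map (fun p =>
      if ((p.2.find? (fun q => q.1 == "value")).map (·.2)) = none ∨
         ((p.2.find? (fun q => q.1 == "value")).map (·.2)) = some "" then (0 : Int) else 1)).sum
  (rich_fields, populated_fields)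

-- ===== PORT B =====
def pvRichSet : PySem.Set String :=
  PySem.Set.ofList ["status", "ssid", "bssid", "signal", "quality", "channel",
                    "channel_width", "protocol", "transmit_power"]

def wisp_data_score_py_alt (module_data : List (String × List (String × String))) : Int × Int :=
  module_data.foldl
    (fun acc kv =>
      let val := (kv.2.find? (fun q => q.1 == "value")).map (·.2)
      if val = none ∨ val = some "" then acc
      else
        (if kv.1 ∈ pvRichSet then acc.1 + 1 else acc.1, acc.2 + 1))
    (0, 0)

-- ===== PRECONDITION & SPEC =====
-- Pre_ excludes association lists with duplicate keys (at top level or inside an entry),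
-- which do not uniquely represent a Python dict (last key wins in Python, first match here).
def Pre_wisp_data_score_py (module_data : List (String × List (String × String))) : Prop :=
  (module_data.map (·.1)).Nodup ∧ ∀ p ∈ module_data, (p.2.map (·.1)).Nodup
instance (module_data : List (String × List (String × String))) : Decidable (Pre_wisp_data_score_py module_data) := by unfold Pre_wisp_data_score_py; infer_instance

def pvWitness_wisp_data_score_py : (List (String × List (String × String))) :=
  [("ssid", [("value", "net")]), ("foo", [("value", "")]), ("signal", [("value", "-60")])]

def Spec_wisp_data_score_py (module_data : List (String × List (String × String))) (out : Int × Int) : Prop := out = wisp_data_score_py_alt module_data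
instance (module_data : List (String × List (String × String))) (out : Int × Int) : Decidable (Spec_wisp_data_score_py module_data out) := by unfold Spec_wisp_data_score_py; infer_instance

-- ===== CLAIM (what is proved, stated in full; the proofs are below) =====
def Claim_equal_wisp_data_score_py : Prop := ∀ (module_data : List (String × List (String × String))), Dom_wisp_data_score_py module_data → Pre_wisp_data_score_py module_data → Spec_wisp_data_score_py module_data (wisp_data_score_py module_data)

-- ===== LEMMAS AND PROOFS =====

-- proof-side abbreviations (not used by the ports)
def pvV (e : List (String × String)) : Option String :=
  (e.find? (fun q => q.1 == "value")).map (·.2)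

def pvPop (e : List (String × String)) : Bool :=
  !decide (pvV e = none ∨ pvV e = some "")

-- B's fold computes the two fused counts
lemma alt_fold (md : List (String × List (String × String))) (a b : Int) :
    md.foldl
      (fun acc kv =>
        let val := (kv.2.find? (fun q => q.1 == "value")).map (·.2)
        if val = none ∨ val = some "" then acc
        else
          (if kv.1 ∈ pvRichSet then acc.1 + 1 else acc.1, acc.2 + 1))
      (a, b)
    = (a + (md.countP (fun p => pvPop p.2 && decide (p.1 ∈ pvRichKeys)) : Int),
       b + (md.countP (fun p => pvPop p.2) : Int)) := by
  induction md generalizing a b with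
  | nil => simp
  | cons p rest ih =>
    simp only [List.foldl_cons, List.countP_cons]
    by_cases h : ((p.2.find? (fun q => q.1 == "value")).map (·.2)) = none ∨
        ((p.2.find? (fun q => q.1 == "value")).map (·.2)) = some ""
    · have hp : pvPop p.2 = false := by unfold pvPop pvV; rw [decide_eq_true h]; rfl
      rw [if_pos h, ih, hp]
      simp
    · have hp : pvPop p.2 = true := by unfold pvPop pvV; rw [decide_eq_false h]; rfl
      have hmem : p.1 ∈ pvRichSet ↔ p.1 ∈ pvRichKeys := by
        simp [pvRichSet, pvRichKeys, PySem.Set.mem_ofList]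
      rw [if_neg h]
      by_cases hk : p.1 ∈ pvRichKeys
      · rw [if_pos (hmem.mpr hk), ih, hp]
        simp [hk]; constructor <;> omega
      · rw [if_neg (hmem.not.mpr hk), ih, hp]
        simp [hk]; omega

-- a 0/1 sum over the items is a countP
lemma sum_ite01 (md : List (String × List (String × String))) :
    (md.map (fun p =>
      if ((p.2.find? (fun q => q.1 == "value")).map (·.2)) = none ∨
         ((p.2.find? (fun q => q.1 == "value")).map (·.2)) = some "" then (0 : Int) else 1)).sum
      = (md.countP (fun p => pvPop p.2) : Int) := by
  induction md with
  | nil => simp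
  | cons p rest ih =>
    simp only [List.map_cons, List.sum_cons, List.countP_cons, ih]
    by_cases h : ((p.2.find? (fun q => q.1 == "value")).map (·.2)) = none ∨
        ((p.2.find? (fun q => q.1 == "value")).map (·.2)) = some ""
    · have hp : pvPop p.2 = false := by unfold pvPop pvV; rw [decide_eq_true h]; rfl
      rw [if_pos h, hp]; simp
    · have hp : pvPop p.2 = true := by unfold pvPop pvV; rw [decide_eq_false h]; rfl
      rw [if_neg h, hp]; simp; omega

-- counting the occurrences of one key under nodup keys = A's lookup indicator
lemma countP_single_key (md : List (String × List (String × String))) (k : String)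
    (hnd : (md.map (·.1)).Nodup) :
    (md.countP (fun p => pvPop p.2 && decide (p.1 = k)) : Int)
      = (if pvEntryValue md k = none ∨ pvEntryValue md k = some "" then (0 : Int) else 1) := by
  induction md with
  | nil => simp [pvEntryValue]
  | cons p rest ih =>
    simp only [List.map_cons, List.nodup_cons] at hnd
    by_cases hk : p.1 = k
    · have hzero : rest.countP (fun q => pvPop q.2 && decide (q.1 = k)) = 0 := by
        rw [List.countP_eq_zero]
        intro q hq
        have hmem : q.1 ∈ rest.map (·.1) := List.mem_map.mpr ⟨q, hq, rfl⟩
        have hne : q.1 ≠ k := fun he => hnd.1 (hk ▸ he ▸ hmem)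
        simp [hne]
      have hev : pvEntryValue (p :: rest) k = (p.2.find? (fun q => q.1 == "value")).map (·.2) := by
        simp [pvEntryValue, hk]
      simp only [List.countP_cons, hzero, hev]
      by_cases h : ((p.2.find? (fun q => q.1 == "value")).map (·.2)) = none ∨
          ((p.2.find? (fun q => q.1 == "value")).map (·.2)) = some ""
      · have hp : pvPop p.2 = false := by unfold pvPop pvV; rw [decide_eq_true h]; rfl
        rw [if_pos h, hp]; simp
      · have hp : pvPop p.2 = true := by unfold pvPop pvV; rw [decide_eq_false h]; rfl
        rw [if_neg h, hp]; simp [hk]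
    · have hev : pvEntryValue (p :: rest) k = pvEntryValue rest k := by
        simp [pvEntryValue, hk]
      simp only [List.countP_cons, hev]
      simp only [hk, decide_false, Bool.and_false]
      simpa using ih hnd.2

-- splitting a membership count at the head of the key list
lemma countP_mem_cons_split (md : List (String × List (String × String)))
    (k : String) (ks : List String) (hkk : k ∉ ks) :
    md.countP (fun p => pvPop p.2 && decide (p.1 ∈ k :: ks))
      = md.countP (fun p => pvPop p.2 && decide (p.1 = k))
        + md.countP (fun p => pvPop p.2 && decide (p.1 ∈ ks)) := by
  induction md with
  | nil => simp
  | cons p rest ihm =>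
    simp only [List.countP_cons]
    rw [ihm]
    by_cases h1 : p.1 = k
    · have h2 : p.1 ∉ ks := h1 ▸ hkk
      by_cases hp : pvPop p.2 = true <;> simp [hp, h1, hkk] <;> omega
    · by_cases hp : pvPop p.2 = true <;> by_cases h2 : p.1 ∈ ks <;>
        simp [hp, h1, h2] <;> omega

-- A's rich sum equals the fused count, for nodup top-level keys and a nodup key list
lemma rich_sum_eq (md : List (String × List (String × String)))
    (hnd : (md.map (·.1)).Nodup) (ks : List String) (hks : ks.Nodup) :
    (ks.map (fun key =>
      if pvEntryValue md key = none ∨ pvEntryValue md key = some "" then (0 : Int) else 1)).sum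
    = (md.countP (fun p => pvPop p.2 && decide (p.1 ∈ ks)) : Int) := by
  induction ks with
  | nil => simp
  | cons k ks ih =>
    simp only [List.nodup_cons] at hks
    have h1 := countP_single_key md k hnd
    simp only [List.map_cons, List.sum_cons, ih hks.2, countP_mem_cons_split md k ks hks.1]
    push_cast
    omega

-- ===== VERDICT (by name: the statement is the Claim_ definition above) =====
theorem wisp_data_score_py_spec : Claim_equal_wisp_data_score_py := by
  intro md _ hpre
  unfold Spec_wisp_data_score_py wisp_data_score_py wisp_data_score_py_alt
  rw [alt_fold md 0 0, Prod.mk.injEq]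
  constructor
  · rw [rich_sum_eq md hpre.1 pvRichKeys (by decide)]
    omega
  · rw [sum_ite01 md]
    omega
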